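-- pv_equiv track=rewrite | github.com/Gelya298/Drakon | python_demo.py | string_comparer
-- ===== SOURCE A (Python) =====
-- def string_comparer(left, right):
--     _next_item_ = 6
--     while True:
--         if _next_item_ == 6:
--             if left < right:
--                 #item 7
--                 return -1
--             else:
--                 _next_item_ = 10
--
--         if _next_item_ == 10:
--             if left > right:
--                 #item 9
--                 return 1
--             else:
--                 #item 8
--                 return 0
-- ===== SOURCE B (Python) =====
-- def string_comparer(left, right):
--     # Single explicit scan: first differing character decides, then length.
--     for a, b in zip(left, right):
--         if a != b:
--             return -1 if a < b else 1
--     if len(left) < len(right):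
--         return -1
--     if len(left) > len(right):
--         return 1
--     return 0
-- ===== Notes on version B (the rewrite author's own statement) =====
-- stated objective: alternative
-- what changed: Replaces the state-machine loop doing two whole-string lexicographic comparisons with one explicit character-by-character scan that decides at the first mismatching character and breaks ties by length.
import Mathlib
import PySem

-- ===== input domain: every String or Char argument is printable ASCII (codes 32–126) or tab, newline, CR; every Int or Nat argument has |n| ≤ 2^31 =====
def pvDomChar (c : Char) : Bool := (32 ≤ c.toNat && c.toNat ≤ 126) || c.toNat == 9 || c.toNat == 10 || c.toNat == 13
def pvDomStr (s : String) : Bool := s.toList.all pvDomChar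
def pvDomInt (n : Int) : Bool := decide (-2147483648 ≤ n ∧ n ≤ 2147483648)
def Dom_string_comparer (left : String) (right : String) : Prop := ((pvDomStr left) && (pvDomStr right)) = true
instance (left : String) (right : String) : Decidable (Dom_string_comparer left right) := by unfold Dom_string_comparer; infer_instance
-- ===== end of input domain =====

-- B scans characters in one pass instead of A's two whole-string comparisons (objective: alternative decomposition).

-- ===== PORT A =====
-- A: state machine, _next_item_ = 6 then 10; literal transliteration of the reached branches.
def string_comparer (left : String) (right : String) : Int :=
  -- _next_item_ == 6
  if left < right then -1
  else -- _next_item_ := 10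
    if left > right then 1 else 0

-- ===== PORT B =====
-- B: loop over zip(left, right): first differing character decides; afterwards compare lengths.
-- The zip loop is the simultaneous recursion; at exhaustion the length comparison of the
-- originals reduces to which remainder is empty (all consumed pairs were equal in length).
def cmpScan : List Char → List Char → Int
  | a :: as, b :: bs => if a ≠ b then (if a < b then -1 else 1) else cmpScan as bs
  | [], [] => 0
  | [], _ :: _ => -1   -- len(left) < len(right)
  | _ :: _, [] => 1    -- len(left) > len(right)

def string_comparer_alt (left : String) (right : String) : Int :=
  cmpScan left.toList right.toList

-- ===== PRECONDITION & SPEC =====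
def Spec_string_comparer (left : String) (right : String) (out : Int) : Prop := out = string_comparer_alt left right
instance (left : String) (right : String) (out : Int) : Decidable (Spec_string_comparer left right out) := by unfold Spec_string_comparer; infer_instance

-- ===== CLAIM (what is proved, stated in full; the proofs are below) =====
def Claim_equal_string_comparer : Prop := ∀ (left : String) (right : String), Dom_string_comparer left right → Spec_string_comparer left right (string_comparer left right)

-- ===== LEMMAS AND PROOFS =====
theorem cmpScan_eq (as bs : List Char) :
    cmpScan as bs = if as < bs then -1 else if bs < as then (1 : Int) else 0 := by
  induction as generalizing bs with
  | nil =>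
    cases bs with
    | nil => simp [cmpScan]
    | cons b bs => simp [cmpScan, List.nil_lt_cons]
  | cons a as ih =>
    cases bs with
    | nil => simp [cmpScan, List.nil_lt_cons, List.not_lt_nil]
    | cons b bs =>
      by_cases hab : a = b
      · subst hab
        simp only [cmpScan, ne_eq, not_true_eq_false, if_false, ih,
          List.cons_lt_cons_iff, lt_irrefl, true_and, false_or]
      · rcases lt_trichotomy a b with h | h | h
        · simp [cmpScan, hab, h, List.cons_lt_cons_iff]
        · exact absurd h hab
        · simp [cmpScan, hab, asymm h, h, List.cons_lt_cons_iff, Ne.symm hab]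

-- ===== VERDICT (by name: the statement is the Claim_ definition above) =====
theorem string_comparer_spec : Claim_equal_string_comparer := by
  intro left right _
  unfold Spec_string_comparer string_comparer string_comparer_alt
  rw [cmpScan_eq]
  simp only [GT.gt, String.lt_iff_toList_lt]
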